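-- pv_equiv track=rewrite | github.com/michael-099/competitive-programming- | FirstPhase/week2/element-appearing-more-than-25-in-sorted-array.py | findSpecialInteger
-- ===== SOURCE A (Python) =====
-- from typing import List
--
-- def findSpecialInteger(arr: List[int]) -> int:
--     percent=len(arr)//4
--     dic={}
--     Max=0
--     for i in arr:
--         dic[i]=dic.get(i,0)+1
--     for key,value  in dic.items():
--         Max=max(Max,value)
--     for key ,value in dic.items():
--         if value==Max:
--             return key
--
--     return 0
-- ===== SOURCE B (Python) =====
-- from typing import List
--
-- def findSpecialInteger(arr: List[int]) -> int:
--     bv, bc = 0, 0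
--     l = arr
--     while l:
--         x = l[0]
--         c = l.count(x)
--         if c > bc:
--             bv, bc = x, c
--         l = [y for y in l if y != x]
--     return bv
-- ===== Notes on version B (the rewrite author's own statement) =====
-- stated objective: alternative
-- what changed: B drops A's frequency dictionary and its three staged passes entirely: an elimination loop repeatedly takes the first element of the remaining list, counts it, updates a running best with a strict comparison (so the first-occurring element wins ties, like A's dict insertion order), and deletes all its occurrences.
import Mathlib
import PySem

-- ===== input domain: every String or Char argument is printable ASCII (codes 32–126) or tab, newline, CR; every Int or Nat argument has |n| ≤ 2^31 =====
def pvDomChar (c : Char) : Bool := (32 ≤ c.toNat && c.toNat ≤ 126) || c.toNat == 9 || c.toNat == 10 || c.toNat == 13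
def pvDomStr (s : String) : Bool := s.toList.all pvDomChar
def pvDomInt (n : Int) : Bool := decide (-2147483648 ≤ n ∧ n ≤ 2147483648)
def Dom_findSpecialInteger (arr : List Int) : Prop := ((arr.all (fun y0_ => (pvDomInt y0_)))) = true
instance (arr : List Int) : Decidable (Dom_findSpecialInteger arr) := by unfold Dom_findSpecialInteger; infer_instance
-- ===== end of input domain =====

-- B drops A's frequency dictionary and its three staged passes: an elimination loop takes the
-- first element of what is left, counts it, updates a running best with a strict comparison,
-- and deletes all its occurrences (objective: alternative).

-- ===== PORT A =====
-- A: build a counter dict over arr, Max = max of its values, return first key with value == Max, else 0.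
def findSpecialInteger (arr : List Int) : Int :=
  let _percent := PySem.Int.floordiv (arr.length : Int) 4
  let dic := arr.foldl (fun d i => d.insert i (d.getD i 0 + 1)) (PySem.Dict.empty : PySem.Dict Int Int)
  let Max := dic.items.foldl (fun M kv => max M kv.2) 0
  match dic.items.find? (fun kv => kv.2 == Max) with
  | some kv => kv.1
  | none => 0

-- ===== PORT B =====
-- B's loop: while l nonempty, x = l[0], c = l.count(x); if c > bc update best; drop all x's from l.
def pvBLoop : List Int → Int → Int → Int
  | [], bv, _ => bv
  | x :: xs, bv, bc =>
    let c : Int := (PySem.List.count (x :: xs) x : Int)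
    if c > bc then pvBLoop ((x :: xs).filter (fun y => !(y == x))) x c
    else pvBLoop ((x :: xs).filter (fun y => !(y == x))) bv bc
termination_by l => l.length
decreasing_by
  · simp only [List.filter_cons, beq_self_eq_true, Bool.not_true, List.length_cons]
    exact Nat.lt_succ_of_le (List.length_filter_le _ _)
  · simp only [List.filter_cons, beq_self_eq_true, Bool.not_true, List.length_cons]
    exact Nat.lt_succ_of_le (List.length_filter_le _ _)

def findSpecialInteger_alt (arr : List Int) : Int :=
  pvBLoop arr 0 0

-- ===== PRECONDITION & SPEC =====
def Spec_findSpecialInteger (arr : List Int) (out : Int) : Prop := out = findSpecialInteger_alt arr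
instance (arr : List Int) (out : Int) : Decidable (Spec_findSpecialInteger arr out) := by unfold Spec_findSpecialInteger; infer_instance

-- ===== CLAIM (what is proved, stated in full; the proofs are below) =====
def Claim_equal_findSpecialInteger : Prop := ∀ (arr : List Int), Dom_findSpecialInteger arr → Spec_findSpecialInteger arr (findSpecialInteger arr)

-- ===== LEMMAS AND PROOFS =====

-- the canonical value both programs compute: max count over arr, and the first element attaining it
def pvMx (arr : List Int) : Int := arr.foldl (fun m x => max m ((List.count x arr : Nat) : Int)) 0
def pvFirstMax (arr : List Int) : Int :=
  match arr.find? (fun x => ((List.count x arr : Nat) : Int) == pvMx arr) with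
  | some x => x
  | none => 0

-- adding elements of l already blocked by some x ∈ s changes nothing
theorem pv_foldl_add_filter (x : Int) : ∀ (l : List Int) (s : PySem.Set Int), x ∈ s →
    List.foldl PySem.Set.add s l = List.foldl PySem.Set.add s (l.filter (fun y => !(y == x))) := by
  intro l
  induction l with
  | nil => intro s _; rfl
  | cons y ys ih =>
    intro s hx
    by_cases hyx : y = x
    · subst hyx
      have hc : PySem.Set.contains s y = true := by simp [PySem.Set.contains, hx]
      have hadd : PySem.Set.add s y = s := by simp only [PySem.Set.add]; rw [if_pos hc]
      rw [List.foldl_cons, hadd]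
      simpa using ih s hx
    · have hkeep : (!(y == x)) = true := by simp [hyx]
      simp only [List.filter_cons, hkeep, if_pos, List.foldl_cons]
      exact ih (s.add y) (by rw [PySem.Set.mem_add]; exact Or.inl hx)

-- a head element no later element matches can be pulled out of the fold
theorem pv_foldl_add_cons (a : Int) : ∀ (l : List Int) (s : PySem.Set Int),
    (∀ y ∈ l, y ≠ a) →
    List.foldl PySem.Set.add (a :: s) l = a :: List.foldl PySem.Set.add s l := by
  intro l
  induction l with
  | nil => intro s _; rfl
  | cons y ys ih =>
    intro s h
    have hya : y ≠ a := h y (by simp)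
    rw [List.foldl_cons, List.foldl_cons]
    have hcc : PySem.Set.contains (a :: s) y = PySem.Set.contains s y := by
      simp [PySem.Set.contains, hya]
    by_cases hcy : PySem.Set.contains s y = true
    · have h1 : PySem.Set.add (a :: s) y = a :: s := by
        simp only [PySem.Set.add]; rw [hcc, if_pos hcy]
      have h2 : PySem.Set.add s y = s := by
        simp only [PySem.Set.add]; rw [if_pos hcy]
      rw [h1, h2]; exact ih s (fun z hz => h z (by simp [hz]))
    · have h1 : PySem.Set.add (a :: s) y = (a :: s) ++ [y] := by
        simp only [PySem.Set.add]; rw [hcc, if_neg hcy]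
      have h2 : PySem.Set.add s y = s ++ [y] := by
        simp only [PySem.Set.add]; rw [if_neg hcy]
      rw [h1, h2]; exact ih (s ++ [y]) (fun z hz => h z (by simp [hz]))

-- first-occurrence dedup, cons characterisation
theorem pv_ofList_cons (x : Int) (xs : List Int) :
    PySem.Set.ofList (x :: xs) = x :: PySem.Set.ofList (xs.filter (fun y => !(y == x))) := by
  show List.foldl PySem.Set.add (PySem.Set.add PySem.Set.empty x) xs = _
  have h1 : PySem.Set.add PySem.Set.empty x = [x] := rfl
  rw [h1, pv_foldl_add_filter x xs [x] (by simp)]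
  have := pv_foldl_add_cons x (xs.filter (fun y => !(y == x))) []
    (by intro y hy; simp at hy; exact hy.2)
  simpa [PySem.Set.ofList, PySem.Set.empty] using this

-- dropping elements a false predicate never matches does not change find?
theorem pv_find?_filter_ne (p : Int → Bool) (x : Int) (hx : p x = false) :
    ∀ (l : List Int), (l.filter (fun y => !(y == x))).find? p = l.find? p := by
  intro l
  induction l with
  | nil => rfl
  | cons y ys ih =>
    by_cases hyx : y = x
    · subst hyx
      have hdrop : (!(y == y)) = false := by simp
      simp only [List.filter_cons, hdrop, Bool.false_eq_true, if_false]
      rw [List.find?_cons_of_neg (by simp [hx]), ih]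
    · have hkeep : (!(y == x)) = true := by simp [hyx]
      simp only [List.filter_cons, hkeep, if_pos]
      cases hpy : p y with
      | true => rw [List.find?_cons_of_pos hpy, List.find?_cons_of_pos hpy]
      | false =>
        rw [List.find?_cons_of_neg (by simp [hpy]), List.find?_cons_of_neg (by simp [hpy])]
        exact ih

-- pointwise-equal predicates find the same first element
theorem pv_find?_congr (p q : Int → Bool) : ∀ (l : List Int), (∀ y ∈ l, p y = q y) →
    l.find? p = l.find? q := by
  intro l
  induction l with
  | nil => intro _; rfl
  | cons y ys ih =>
    intro h
    simp only [List.find?_cons]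
    rw [h y (by simp)]
    cases q y with
    | true => rfl
    | false => exact ih (fun z hz => h z (by simp [hz]))

-- first match in the first-occurrence dedup = first match in the list
theorem pv_find?_ofList (p : Int → Bool) : ∀ (n : Nat) (l : List Int), l.length ≤ n →
    (PySem.Set.ofList l).find? p = l.find? p := by
  intro n
  induction n with
  | zero => intro l hl; simp at hl; simp [hl, PySem.Set.ofList, PySem.Set.empty]
  | succ n ih =>
    intro l hl
    cases l with
    | nil => rfl
    | cons x xs =>
      rw [pv_ofList_cons]
      cases hpx : p x with
      | true => rw [List.find?_cons_of_pos hpx, List.find?_cons_of_pos hpx]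
      | false =>
        rw [List.find?_cons_of_neg (by simp only [hpx]; exact Bool.false_ne_true), List.find?_cons_of_neg (by simp [hpx])]
        rw [ih _ (le_trans (List.length_filter_le _ _) (by simpa using hl))]
        exact pv_find?_filter_ne p x hpx xs

-- max-fold over f: characterisation and membership-congruence
theorem pv_maxf_bounds (f : Int → Int) : ∀ (l : List Int) (a : Int),
    a ≤ l.foldl (fun m x => max m (f x)) a ∧ ∀ y ∈ l, f y ≤ l.foldl (fun m x => max m (f x)) a := by
  intro l
  induction l with
  | nil => intro a; simp
  | cons x xs ih =>
    intro a
    constructor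
    · exact le_trans (le_max_left a (f x)) (ih (max a (f x))).1
    · intro y hy
      rcases List.mem_cons.mp hy with h | h
      · subst h; exact le_trans (le_max_right a (f y)) (ih (max a (f y))).1
      · exact (ih (max a (f x))).2 y h

theorem pv_maxf_cases (f : Int → Int) : ∀ (l : List Int) (a : Int),
    l.foldl (fun m x => max m (f x)) a = a ∨ ∃ y ∈ l, l.foldl (fun m x => max m (f x)) a = f y := by
  intro l
  induction l with
  | nil => intro a; simp
  | cons x xs ih =>
    intro a
    rcases ih (max a (f x)) with h | ⟨y, hy, h⟩
    · rcases max_cases a (f x) with ⟨he, _⟩ | ⟨he, _⟩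
      · left; simpa [he] using h
      · right; exact ⟨x, by simp, by simpa [he] using h⟩
    · right; exact ⟨y, by simp [hy], h⟩

theorem pv_maxf_congr (f : Int → Int) (l1 l2 : List Int) (h : ∀ x, x ∈ l1 ↔ x ∈ l2) :
    l1.foldl (fun m x => max m (f x)) 0 = l2.foldl (fun m x => max m (f x)) 0 := by
  apply le_antisymm
  · rcases pv_maxf_cases f l1 0 with he | ⟨y, hy, he⟩
    · rw [he]; exact (pv_maxf_bounds f l2 0).1
    · rw [he]; exact (pv_maxf_bounds f l2 0).2 y ((h y).mp hy)
  · rcases pv_maxf_cases f l2 0 with he | ⟨y, hy, he⟩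
    · rw [he]; exact (pv_maxf_bounds f l1 0).1
    · rw [he]; exact (pv_maxf_bounds f l1 0).2 y ((h y).mpr hy)

-- counts are unchanged by deleting all occurrences of a DIFFERENT value
theorem pv_count_filter_ne (a x : Int) (l : List Int) (h : a ≠ x) :
    List.count a (l.filter (fun y => !(y == x))) = List.count a l := by
  rw [List.count_filter]; simp [h]

-- pvMx of a nonempty list splits as max of the head's count and pvMx of the rest
theorem pv_Mx_cons (x : Int) (xs : List Int) :
    pvMx (x :: xs) = max ((List.count x (x :: xs) : Nat) : Int)
      (pvMx (xs.filter (fun y => !(y == x)))) := by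
  set l := x :: xs with hl
  set rest := xs.filter (fun y => !(y == x)) with hrest
  have hmemrest : ∀ y, y ∈ rest → y ∈ l ∧ y ≠ x := by
    intro y hy
    rw [hrest, List.mem_filter] at hy
    refine ⟨by simp [hl, hy.1], by simpa using hy.2⟩
  have hcnt : ∀ y, y ∈ rest → ((List.count y rest : Nat) : Int) = ((List.count y l : Nat) : Int) := by
    intro y hy
    rw [hrest, pv_count_filter_ne y x xs (hmemrest y hy).2, hl, List.count_cons]
    simp [Ne.symm (hmemrest y hy).2]
  have hc0 : (0 : Int) ≤ ((List.count x l : Nat) : Int) := by positivity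
  apply le_antisymm
  · rcases pv_maxf_cases (fun y => ((List.count y l : Nat) : Int)) l 0 with he | ⟨y, hy, he⟩
    · rw [pvMx, he]; exact le_trans hc0 (le_max_left _ _)
    · rw [pvMx, he]
      by_cases hyx : y = x
      · subst hyx; exact le_max_left _ _
      · have hyrest : y ∈ rest := by
          rw [hrest, List.mem_filter]
          rcases List.mem_cons.mp (hl ▸ hy) with h | h
          · exact absurd h hyx
          · exact ⟨h, by simpa using hyx⟩
        calc ((List.count y l : Nat) : Int) = ((List.count y rest : Nat) : Int) := (hcnt y hyrest).symm
          _ ≤ pvMx rest := (pv_maxf_bounds _ rest 0).2 y hyrest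
          _ ≤ _ := le_max_right _ _
  · apply max_le
    · exact (pv_maxf_bounds (fun y => ((List.count y l : Nat) : Int)) l 0).2 x (by simp [hl])
    · rcases pv_maxf_cases (fun y => ((List.count y rest : Nat) : Int)) rest 0 with he | ⟨y, hy, he⟩
      · rw [pvMx, he]; exact (pv_maxf_bounds _ l 0).1
      · rw [pvMx, he, hcnt y hy]
        exact (pv_maxf_bounds (fun y => ((List.count y l : Nat) : Int)) l 0).2 y (hmemrest y hy).1

-- when the head's count is below the maximum, the first maximiser is found among the rest
theorem pv_firstMax_cons_of_lt (x : Int) (xs : List Int)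
    (hlt : ((List.count x (x :: xs) : Nat) : Int) < pvMx (x :: xs)) :
    pvFirstMax (x :: xs) = pvFirstMax (xs.filter (fun y => !(y == x))) := by
  have hsplit := pv_Mx_cons x xs
  have hMx : pvMx (x :: xs) = pvMx (xs.filter (fun y => !(y == x))) := by
    rcases le_or_gt (pvMx (xs.filter (fun y => !(y == x)))) ((List.count x (x :: xs) : Nat) : Int) with h | h
    · rw [hsplit, max_eq_left h] at hlt; omega
    · rw [hsplit, max_eq_right h.le]
  have hpx : (((List.count x (x :: xs) : Nat) : Int) == pvMx (x :: xs)) = false := by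
    rw [beq_eq_false_iff_ne]; intro he; rw [he] at hlt; omega
  have hcong : ∀ y ∈ xs.filter (fun y => !(y == x)),
      (((List.count y (x :: xs) : Nat) : Int) == pvMx (x :: xs))
      = (((List.count y (xs.filter (fun y => !(y == x))) : Nat) : Int)
          == pvMx (xs.filter (fun y => !(y == x)))) := by
    intro y hy
    have hyx : y ≠ x := by
      rw [List.mem_filter] at hy; simpa using hy.2
    rw [pv_count_filter_ne y x xs hyx, List.count_cons, hMx]
    simp [Ne.symm hyx]
  unfold pvFirstMax
  rw [List.find?_cons_of_neg (by simp only [hpx]; exact Bool.false_ne_true),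
      ← pv_find?_filter_ne _ x hpx xs,
      pv_find?_congr _ _ _ hcong]

-- when the head's count IS the maximum, the head is the first maximiser
theorem pv_firstMax_cons_of_eq (x : Int) (xs : List Int)
    (heq : ((List.count x (x :: xs) : Nat) : Int) = pvMx (x :: xs)) :
    pvFirstMax (x :: xs) = x := by
  unfold pvFirstMax
  rw [List.find?_cons_of_pos (by simp only [heq, beq_self_eq_true])]

-- the elimination loop computes "first maximiser if its count beats bc, else bv"
theorem pv_loop_spec : ∀ (n : Nat) (l : List Int), l.length ≤ n → ∀ (bv bc : Int), 0 ≤ bc →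
    pvBLoop l bv bc = if bc < pvMx l then pvFirstMax l else bv := by
  intro n
  induction n with
  | zero =>
    intro l hl bv bc hbc
    have : l = [] := List.length_eq_zero_iff.mp (Nat.le_zero.mp hl)
    subst this
    simp only [pvBLoop, pvMx, List.foldl_nil]
    rw [if_neg (by omega)]
  | succ n ih =>
    intro l hl bv bc hbc
    cases l with
    | nil =>
      simp only [pvBLoop, pvMx, List.foldl_nil]
      rw [if_neg (by omega)]
    | cons x xs =>
      have hrl : (xs.filter (fun y => !(y == x))).length ≤ n := by
        have := List.length_filter_le (fun y => !(y == x)) xs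
        simp only [List.length_cons] at hl
        omega
      have hcnt : (PySem.List.count (x :: xs) x : Int) = ((List.count x (x :: xs) : Nat) : Int) := by
        rw [PySem.List.count_eq]
      have hc0 : (0 : Int) ≤ ((List.count x (x :: xs) : Nat) : Int) := by positivity
      have hsplit := pv_Mx_cons x xs
      have hfil : (x :: xs).filter (fun y => !(y == x)) = xs.filter (fun y => !(y == x)) := by
        simp
      rw [pvBLoop, hfil, hcnt]
      by_cases hbr : bc < ((List.count x (x :: xs) : Nat) : Int)
      · rw [if_pos hbr, ih _ hrl x _ hc0]
        have hout : bc < pvMx (x :: xs) := by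
          have : ((List.count x (x :: xs) : Nat) : Int) ≤ pvMx (x :: xs) := by
            rw [hsplit]; exact le_max_left _ _
          omega
        rw [if_pos hout]
        by_cases hin : ((List.count x (x :: xs) : Nat) : Int) < pvMx (xs.filter (fun y => !(y == x)))
        · rw [if_pos hin, pv_firstMax_cons_of_lt x xs (by rw [hsplit]; omega)]
        · rw [if_neg hin, pv_firstMax_cons_of_eq x xs (by rw [hsplit]; omega)]
      · rw [if_neg hbr, ih _ hrl bv bc hbc]
        by_cases hin : bc < pvMx (xs.filter (fun y => !(y == x)))
        · rw [if_pos hin]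
          have hout : bc < pvMx (x :: xs) := by rw [hsplit]; omega
          rw [if_pos hout, pv_firstMax_cons_of_lt x xs (by rw [hsplit]; omega)]
        · rw [if_neg hin, if_neg (by rw [hsplit]; omega)]

-- A computes the first maximiser
theorem pv_A_canon (arr : List Int) : findSpecialInteger arr = pvFirstMax arr := by
  simp only [findSpecialInteger]
  simp only [PySem.Dict.foldl_insert_getD_add_one_eq_counter, PySem.Dict.items_counter,
    List.foldl_map, List.find?_map]
  have hmax : (PySem.Set.ofList arr).foldl
      (fun M k => max M ((fun k => (k, ((List.count k arr : Nat) : Int))) k).2) 0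
      = pvMx arr := by
    simp only []
    exact pv_maxf_congr (fun k => ((List.count k arr : Nat) : Int)) _ _
      (fun x => PySem.Set.mem_ofList arr x)
  rw [hmax]
  have h1 : ((fun (kv : Int × Int) => kv.2 == pvMx arr)
        ∘ (fun k => (k, ((List.count k arr : Nat) : Int))))
      = fun y => ((List.count y arr : Nat) : Int) == pvMx arr := by
    funext k; simp
  rw [h1, pv_find?_ofList _ arr.length arr (le_refl _)]
  unfold pvFirstMax
  cases arr.find? (fun y => ((List.count y arr : Nat) : Int) == pvMx arr) with
  | none => rfl
  | some x => rfl

-- B computes the first maximiser (the empty list gives 0 = pvFirstMax [])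
theorem pv_B_canon (arr : List Int) : findSpecialInteger_alt arr = pvFirstMax arr := by
  simp only [findSpecialInteger_alt]
  rw [pv_loop_spec arr.length arr (le_refl _) 0 0 (le_refl 0)]
  cases arr with
  | nil => simp [pvMx, pvFirstMax]
  | cons x xs =>
    have hb := (pv_maxf_bounds (fun y => ((List.count y (x :: xs) : Nat) : Int)) (x :: xs) 0).2
      x (by simp)
    have h1 : 1 ≤ List.count x (x :: xs) := by
      simp [List.count_cons_self]
    have hpos : (0 : Int) < pvMx (x :: xs) := by
      have : (1 : Int) ≤ ((List.count x (x :: xs) : Nat) : Int) := by exact_mod_cast h1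
      calc (0 : Int) < 1 := one_pos
        _ ≤ ((List.count x (x :: xs) : Nat) : Int) := this
        _ ≤ _ := hb
    rw [if_pos hpos]

-- ===== VERDICT (by name: the statement is the Claim_ definition above) =====
theorem findSpecialInteger_spec : Claim_equal_findSpecialInteger := by
  intro arr _
  unfold Spec_findSpecialInteger
  rw [pv_A_canon, pv_B_canon]
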